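-- pv_equiv track=rewrite | github.com/WrenMcQueary/cs_747_final_project | classifier.py | get_input_channels_by_layer_count
-- ===== SOURCE A (Python) =====
-- def get_input_channels_by_layer_count(layers):
--     """Return the number of input channels that every CONVOLUTIONAL LAYER should have, given the number of layers.
--     :param layers: the number of convolutional layers
--     """
--     input_channels_by_layer = []
--     for ii in range(layers):
--         if ii == layers-1:
--             input_channels_by_layer = [3] + input_channels_by_layer
--         else:
--             input_channels_by_layer = [32 * 2**ii] + input_channels_by_layer
--     return input_channels_by_layer
-- ===== SOURCE B (Python) =====
-- def get_input_channels_by_layer_count(layers):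
--     """Return the number of input channels that every CONVOLUTIONAL LAYER should have, given the number of layers.
--     :param layers: the number of convolutional layers
--     """
--     if layers <= 0:
--         return []
--     tail = []
--     ch = 32
--     for _ in range(layers - 1):
--         tail.append(ch)
--         ch *= 2
--     return [3] + tail[::-1]
-- ===== Notes on version B (the rewrite author's own statement) =====
-- stated objective: faster
-- what changed: Replaces A's reverse-building prepend loop with its last-index sentinel by a doubling accumulator appended in order, reversed once, with the first element prepended; this removes the quadratic list-prepend copying and the per-index exponentiation.
import Mathlib
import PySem

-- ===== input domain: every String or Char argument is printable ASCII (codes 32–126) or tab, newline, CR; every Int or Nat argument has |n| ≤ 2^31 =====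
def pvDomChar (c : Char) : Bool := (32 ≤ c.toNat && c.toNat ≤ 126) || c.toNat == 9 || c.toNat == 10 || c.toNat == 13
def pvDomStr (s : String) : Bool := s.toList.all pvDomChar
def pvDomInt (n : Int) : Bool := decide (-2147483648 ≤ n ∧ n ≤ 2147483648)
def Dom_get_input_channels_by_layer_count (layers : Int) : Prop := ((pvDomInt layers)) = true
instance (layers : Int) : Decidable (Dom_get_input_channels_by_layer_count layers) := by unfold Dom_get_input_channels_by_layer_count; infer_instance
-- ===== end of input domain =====

-- B replaces A's reverse-building prepend loop (with its ii==layers-1 sentinel) by a doubling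
-- accumulator appended in order, reversed once, with 3 prepended; same return value, alternative structure.

-- ===== PORT A =====
-- A's loop over range(layers): prepend 3 on the last index, else 32 * 2**ii.
-- (2 ** ii ported as 2 ^ ii.toNat; every ii produced by range(layers) is ≥ 0, where this is exact.)
def get_input_channels_by_layer_count (layers : Int) : List Int :=
  (PySem.List.pyRange 0 layers 1).foldl
    (fun input_channels_by_layer ii =>
      if ii = layers - 1 then (3 : Int) :: input_channels_by_layer
      else (32 * 2 ^ ii.toNat) :: input_channels_by_layer) []

-- ===== PORT B =====
-- B: early return [] for layers ≤ 0; otherwise append a doubling channel count for layers-1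
-- steps (state = appended tail × current channel count), reverse the tail, prepend 3.
def get_input_channels_by_layer_count_alt (layers : Int) : List Int :=
  if layers ≤ 0 then []
  else
    let p := (PySem.List.pyRange 0 (layers - 1) 1).foldl
      (fun (p : List Int × Int) _ => (p.1 ++ [p.2], p.2 * 2)) ([], 32)
    3 :: p.1.reverse

-- ===== PRECONDITION & SPEC =====
def Spec_get_input_channels_by_layer_count (layers : Int) (out : List Int) : Prop := out = get_input_channels_by_layer_count_alt layers
instance (layers : Int) (out : List Int) : Decidable (Spec_get_input_channels_by_layer_count layers out) := by unfold Spec_get_input_channels_by_layer_count; infer_instance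

-- ===== CLAIM (what is proved, stated in full; the proofs are below) =====
def Claim_equal_get_input_channels_by_layer_count : Prop := ∀ (layers : Int), Dom_get_input_channels_by_layer_count layers → Spec_get_input_channels_by_layer_count layers (get_input_channels_by_layer_count layers)

-- ===== LEMMAS AND PROOFS =====

-- A's fold: prepending h x is reverse-map ++ acc
theorem foldl_prepend {α β : Type} (h : α → β) :
    ∀ (l : List α) (acc : List β),
      l.foldl (fun a x => h x :: a) acc = (l.map h).reverse ++ acc := by
  intro l
  induction l with
  | nil => intro acc; simp
  | cons x xs ih => intro acc; simp [List.foldl_cons, ih]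

-- B's fold: the appended tail is the geometric sequence c, 2c, 4c, …
theorem tail_fold {α : Type} :
    ∀ (l : List α) (acc : List Int) (c : Int),
      (l.foldl (fun (p : List Int × Int) _ => (p.1 ++ [p.2], p.2 * 2)) (acc, c)).1
        = acc ++ (List.range l.length).map (fun i => c * 2 ^ i) := by
  intro l
  induction l with
  | nil => intro acc c; simp
  | cons x xs ih =>
      intro acc c
      simp only [List.foldl_cons, List.length_cons]
      rw [ih]
      rw [List.range_succ_eq_map]
      simp only [List.map_cons, List.map_map, pow_zero, mul_one, List.append_assoc,
        List.singleton_append]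
      congr 1
      · congr 1
        apply List.map_congr_left
        intro j _
        simp [Function.comp, pow_succ]
        ring

theorem get_input_channels_by_layer_count_spec : Claim_equal_get_input_channels_by_layer_count := by
  intro layers _
  unfold Spec_get_input_channels_by_layer_count
  unfold get_input_channels_by_layer_count get_input_channels_by_layer_count_alt
  by_cases hle : layers ≤ 0
  · have h0 : layers.toNat = 0 := by omega
    simp [hle]
  · simp only [hle, if_false]
    rw [PySem.List.pyRange_one, PySem.List.pyRange_one]
    rw [List.foldl_map, List.foldl_map]
    -- A side
    have hstep : (fun (x : List Int) (y : Nat) =>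
          if (0:Int) + y = layers - 1 then (3:Int) :: x else 32 * 2 ^ ((0:Int) + (y:Int)).toNat :: x)
        = (fun (a : List Int) (x : Nat) =>
          (if ((0:Int) + x) = layers - 1 then (3:Int) else 32 * 2 ^ ((0:Int) + (x:Int)).toNat) :: a) := by
      funext a x; split_ifs <;> rfl
    rw [hstep, foldl_prepend]
    -- B side
    rw [tail_fold]
    simp only [List.length_range, List.nil_append, List.append_nil]
    obtain ⟨k, hk⟩ : ∃ k, layers.toNat = k + 1 := ⟨layers.toNat - 1, by omega⟩
    have hA : (layers - 0).toNat = k + 1 := by omega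
    have hsub : (layers - 1 - 0).toNat = k := by omega
    rw [hsub, hA]
    rw [List.range_succ, List.map_append]
    have hlast : (if ((0:Int) + (k : Nat)) = layers - 1 then (3:Int)
        else 32 * 2 ^ ((0:Int) + ((k : Nat):Int)).toNat) = 3 := by
      have : ((0:Int) + (k : Nat)) = layers - 1 := by omega
      simp [this]
    simp only [List.map_cons, List.map_nil]
    rw [hlast]
    simp only [List.reverse_append, List.reverse_cons, List.reverse_nil, List.nil_append,
      List.singleton_append]
    congr 1
    congr 1
    apply List.map_congr_left
    intro j hj
    simp only [List.mem_range] at hj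
    have hne : ¬ ((0:Int) + (j:Int)) = layers - 1 := by omega
    simp only [hne, if_false]
    have hj0 : ((0:Int) + (j:Int)).toNat = j := by omega
    rw [hj0]
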